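-- pv_equiv track=rewrite | github.com/K0DA-PARALLAXStudio/TensorSort_Model_Installer-Comfyui | _Module/modul15_vlm_llm.py | detect_vlm_llm_type
-- ===== SOURCE A (Python) =====
-- def detect_vlm_llm_type(keys):
--     """Unterscheidet: VLM / LLM / None
--
--     VLM = Vision-Language Model (Image→Text)
--       - Hat BEIDE: Visual Encoder UND Language Model
--       - Keys: "visual.*" + "model.layers.*"
--       - Beispiel: Qwen-VL, LLaVA, MiniCPM-V
--
--     LLM = Pure Language Model (Text→Text)
--       - Hat NUR Language Model, KEIN Visual
--       - Keys: "model.layers.*" OHNE "visual.*"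
--       - Beispiel: Florence-2, GPT-style
--
--     Returns:
--         str: "VLM", "LLM", oder None
--     """
--     # Check: Hat Language Model?
--     has_language = any(k.startswith("model.layers.") for k in keys)
--
--     # Check: Hat Visual Encoder?
--     # WICHTIG: Verschiedene Patterns!
--     # - Qwen: "visual.blocks.*"
--     # - LLaVA: "vision_tower.*"
--     # - MiniCPM: "vpm.*"
--     has_visual = any(
--         k.startswith("visual.") or
--         k.startswith("vision_tower.") or
--         k.startswith("vpm.") or
--         "image_encoder" in k
--         for k in keys
--     )
--
--     if has_language and has_visual:
--         return "VLM"
--     elif has_language and not has_visual: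
--         return "LLM"
--     else:
--         return None
-- ===== SOURCE B (Python) =====
-- def _key_code(k):
--     # bit 0: language-model key, bit 1: visual-encoder key
--     lang = k.startswith("model.layers.")
--     vis = k.startswith(("visual.", "vision_tower.", "vpm.")) or "image_encoder" in k
--     return lang + 2 * vis
--
-- def detect_vlm_llm_type(keys):
--     # OR-fold the per-key codes into one mask, then a table lookup: no branches.
--     mask = 0
--     for k in keys:
--         mask |= _key_code(k)
--     return {1: "LLM", 3: "VLM"}.get(mask)
-- ===== Notes on version B (the rewrite author's own statement) =====
-- stated objective: alternative
-- what changed: Replaces the two any() scans and the three-way if/elif branch by a per-key 2-bit classification code OR-folded into a single mask, whose value is turned into the answer by a table lookup {1:'LLM',3:'VLM'}.get(mask); no boolean flags or conditional branches remain.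
import Mathlib
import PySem

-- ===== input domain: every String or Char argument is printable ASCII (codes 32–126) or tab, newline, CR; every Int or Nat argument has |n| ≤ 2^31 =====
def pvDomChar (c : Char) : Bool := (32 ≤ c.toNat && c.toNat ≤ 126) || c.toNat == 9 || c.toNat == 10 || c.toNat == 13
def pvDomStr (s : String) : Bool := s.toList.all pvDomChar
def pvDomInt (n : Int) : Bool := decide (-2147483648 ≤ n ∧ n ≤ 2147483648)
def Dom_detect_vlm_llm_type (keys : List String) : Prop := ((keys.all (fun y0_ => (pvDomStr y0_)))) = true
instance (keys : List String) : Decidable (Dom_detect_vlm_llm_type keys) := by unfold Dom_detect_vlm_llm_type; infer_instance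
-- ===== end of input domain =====

-- B replaces A's two any() scans and if/elif branch by an OR-fold of per-key 2-bit codes plus a table lookup (alternative decomposition, same cost).
-- ===== PORT A =====
def detect_vlm_llm_type (keys : List String) : Option String :=
  let has_language := keys.any (fun k => PySem.Str.startswith k "model.layers.")
  let has_visual := keys.any (fun k =>
    PySem.Str.startswith k "visual." ||
    PySem.Str.startswith k "vision_tower." ||
    PySem.Str.startswith k "vpm." ||
    PySem.Str.isIn "image_encoder" k)
  if has_language && has_visual then some "VLM"
  else if has_language && !has_visual then some "LLM"
  else none

-- ===== PORT B =====
-- bit 0: language-model key, bit 1: visual-encoder key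
def pvKeyCode (k : String) : Int :=
  (if PySem.Str.startswith k "model.layers." then (1:Int) else 0)
  + 2 * (if (PySem.Str.startswith k "visual." ||
             PySem.Str.startswith k "vision_tower." ||
             PySem.Str.startswith k "vpm." ||
             PySem.Str.isIn "image_encoder" k) then (1:Int) else 0)

def detect_vlm_llm_type_alt (keys : List String) : Option String :=
  let mask := keys.foldl (fun m k => m.lor (pvKeyCode k)) 0
  (PySem.Dict.ofList [((1:Int), "LLM"), ((3:Int), "VLM")]).get? mask

-- ===== PRECONDITION & SPEC =====
def Spec_detect_vlm_llm_type (keys : List String) (out : Option String) : Prop := out = detect_vlm_llm_type_alt keys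
instance (keys : List String) (out : Option String) : Decidable (Spec_detect_vlm_llm_type keys out) := by unfold Spec_detect_vlm_llm_type; infer_instance

-- ===== CLAIM (what is proved, stated in full; the proofs are below) =====
def Claim_equal_detect_vlm_llm_type : Prop := ∀ (keys : List String), Dom_detect_vlm_llm_type keys → Spec_detect_vlm_llm_type keys (detect_vlm_llm_type keys)

-- ===== LEMMAS AND PROOFS =====
-- encode two booleans as the 2-bit mask B's fold computes
def pvEnc (a b : Bool) : Int := (if a then 1 else 0) + 2 * (if b then 1 else 0)

theorem pvEnc_lor (a b c d : Bool) : (pvEnc a b).lor (pvEnc c d) = pvEnc (a || c) (b || d) := by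
  cases a <;> cases b <;> cases c <;> cases d <;> decide

theorem pvKeyCode_enc (k : String) :
    pvKeyCode k = pvEnc (PySem.Str.startswith k "model.layers.")
      (PySem.Str.startswith k "visual." || PySem.Str.startswith k "vision_tower." ||
       PySem.Str.startswith k "vpm." || PySem.Str.isIn "image_encoder" k) := rfl

theorem pvFold_enc (keys : List String) (a b : Bool) :
    keys.foldl (fun m k => m.lor (pvKeyCode k)) (pvEnc a b)
      = pvEnc (a || keys.any (fun k => PySem.Str.startswith k "model.layers."))
              (b || keys.any (fun k =>
                 PySem.Str.startswith k "visual." || PySem.Str.startswith k "vision_tower." ||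
                 PySem.Str.startswith k "vpm." || PySem.Str.isIn "image_encoder" k)) := by
  induction keys generalizing a b with
  | nil => simp
  | cons k ks ih =>
    rw [List.foldl_cons, pvKeyCode_enc k, pvEnc_lor, ih]
    simp [Bool.or_assoc]

-- ===== VERDICT (by name: the statement is the Claim_ definition above) =====
theorem detect_vlm_llm_type_spec : Claim_equal_detect_vlm_llm_type := by
  intro keys _
  unfold Spec_detect_vlm_llm_type detect_vlm_llm_type detect_vlm_llm_type_alt
  have h0 : (0 : Int) = pvEnc false false := rfl
  rw [h0, pvFold_enc]
  cases keys.any (fun k => PySem.Str.startswith k "model.layers.") <;>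
    cases keys.any (fun k =>
       PySem.Str.startswith k "visual." || PySem.Str.startswith k "vision_tower." ||
       PySem.Str.startswith k "vpm." || PySem.Str.isIn "image_encoder" k) <;>
    rfl
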